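-- pv_equiv track=rewrite | github.com/Gabkings/python-practise | interview_quizes/questionmarks/QuestionsMarks.py | QsMarks
-- ===== SOURCE A (Python) =====
-- def QsMarks(string_value):
--     #declaring the viriables
--     question_mark_number = 0
--     second_no = 0
--     has_10 = False
--     #looping through the given string
--     for character in string_value:
--       #checking the first number in the string
--         if character.isdigit():
--             '''
--               1: converting the first number into integer
--               2: checking if first number plus the second number is equal to ten
--               3: maintaining the position of every pair of numbers that add up to 10.
--               4: If you do find two numbers that add up to 10
--               5: determine if exactly 3 specific characters exist somewhere between these two indices.
--             '''
--             if int(character) + second_no == 10: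
--               #check if the question marks are 3 btw the two numbers
--                 if question_mark_number != 3:
--                   #return false if question marks are less then 3
--                     return 'false'
--                 has_10 = True
--             #converting the second no to integer
--             second_no = int(character)
--             question_mark_number = 0
--         elif character == '?':
--           #incrementing the number of question marks if any found in between the two numbers
--             question_mark_number += 1
--     return 'true' if has_10 else 'false'
-- ===== SOURCE B (Python) =====
-- def QsMarks(string_value):
--     digits = [(i, int(c)) for i, c in enumerate(string_value) if c.isdigit()]
--     found = False
--     for (i, a), (j, b) in zip(digits, digits[1:]):
--         if a + b == 10:
--             if len([ch for ch in string_value[i + 1:j] if ch == '?']) != 3: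
--                 return 'false'
--             found = True
--     return 'true' if found else 'false'
-- ===== Notes on version B (the rewrite author's own statement) =====
-- stated objective: alternative
-- what changed: Replaces A's stateful single scan (previous-digit register plus running question-mark counter reset at every digit) by an index-then-pairwise pass: first collect (index, value) for every digit character, then check each consecutive digit pair summing to 10 by counting the question marks directly in the slice between the two indices.
import Mathlib
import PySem

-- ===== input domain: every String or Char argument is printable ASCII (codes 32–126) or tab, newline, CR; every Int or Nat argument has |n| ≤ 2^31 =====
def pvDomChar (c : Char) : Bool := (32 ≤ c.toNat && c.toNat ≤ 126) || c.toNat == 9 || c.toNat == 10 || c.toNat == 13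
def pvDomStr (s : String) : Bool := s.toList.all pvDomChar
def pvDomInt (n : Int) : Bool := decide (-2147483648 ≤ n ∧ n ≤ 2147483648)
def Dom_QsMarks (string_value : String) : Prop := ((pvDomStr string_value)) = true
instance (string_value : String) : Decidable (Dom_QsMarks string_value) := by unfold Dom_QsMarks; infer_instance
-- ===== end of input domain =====

-- B replaces A's stateful single scan by a digit-index pass followed by a pairwise
-- check that counts '?' in the slice between consecutive digits (alternative decomposition, same cost).


-- ===== PORT A =====
-- A's loop: state = (question_mark_number, second_no, has_10); int(character) on a
-- digit char is (PySem.Int.ofChars? [c]).getD 0 (always `some` on ASCII digits).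
def qsLoopA : List Char → Int → Int → Bool → String
  | [], _, _, has10 => if has10 then "true" else "false"
  | c :: rest, qm, second, has10 =>
    if PySem.Chars.isdigit c then
      if (PySem.Int.ofChars? [c]).getD 0 + second == 10 then
        if qm != 3 then "false"
        else qsLoopA rest 0 ((PySem.Int.ofChars? [c]).getD 0) true
      else qsLoopA rest 0 ((PySem.Int.ofChars? [c]).getD 0) has10
    else if c == '?' then qsLoopA rest (qm + 1) second has10
    else qsLoopA rest qm second has10

def QsMarks (string_value : String) : String :=
  qsLoopA string_value.toList 0 0 false

-- ===== PORT B =====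
-- [(i, int(c)) for i, c in enumerate(string_value) if c.isdigit()]
def qsDigits : Int → List Char → List (Int × Int)
  | _, [] => []
  | n, c :: t =>
    if PySem.Chars.isdigit c then (n, (PySem.Int.ofChars? [c]).getD 0) :: qsDigits (n + 1) t
    else qsDigits (n + 1) t

-- len([ch for ch in string_value[i+1:j] if ch == '?'])
def qsGapQ (cs : List Char) (i j : Int) : Nat :=
  ((PySem.List.slice cs (some (i + 1)) (some j)).filter (fun ch => ch == '?')).length

-- for (i, a), (j, b) in zip(digits, digits[1:]): …
def qsPairs : List Char → List ((Int × Int) × (Int × Int)) → Bool → String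
  | _, [], found => if found then "true" else "false"
  | cs, ((i, a), (j, b)) :: rest, found =>
    if a + b == 10 then
      if qsGapQ cs i j != 3 then "false"
      else qsPairs cs rest true
    else qsPairs cs rest found

def QsMarks_alt (string_value : String) : String :=
  let digits := qsDigits 0 string_value.toList
  qsPairs string_value.toList (digits.zip (digits.drop 1)) false

-- ===== PRECONDITION & SPEC =====
def Spec_QsMarks (string_value : String) (out : String) : Prop := out = QsMarks_alt string_value
instance (string_value : String) (out : String) : Decidable (Spec_QsMarks string_value out) := by unfold Spec_QsMarks; infer_instance

-- ===== CLAIM (what is proved, stated in full; the proofs are below) =====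
def Claim_equal_QsMarks : Prop := ∀ (string_value : String), Dom_QsMarks string_value → Spec_QsMarks string_value (QsMarks string_value)

-- ===== LEMMAS AND PROOFS =====

-- number of '?' strictly between positions a-1 … b of cs (the invariant behind A's counter)
def qsSeg (cs : List Char) (a b : Nat) : Nat :=
  ((cs.drop a).take (b - a)).countP (fun ch => ch == '?')

theorem qsVal_ne_ten (c : Char) (h : PySem.Chars.isdigit c = true) :
    ((PySem.Int.ofChars? [c]).getD 0 + 0 == (10 : Int)) = false := by
  have h1 : '0' ≤ c ∧ c ≤ '9' := by simpa [PySem.Chars.isdigit] using h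
  have h2 : 48 ≤ c.toNat ∧ c.toNat ≤ 57 := by
    obtain ⟨a, b⟩ := h1
    exact ⟨by simpa using (UInt32.le_iff_toNat_le.mp (Char.le_def.mp a)),
           by simpa using (UInt32.le_iff_toNat_le.mp (Char.le_def.mp b))⟩
  have e : Char.ofNat c.toNat = c := Char.ofNat_toNat c
  have hk : c.toNat = 48 ∨ c.toNat = 49 ∨ c.toNat = 50 ∨ c.toNat = 51 ∨ c.toNat = 52 ∨
      c.toNat = 53 ∨ c.toNat = 54 ∨ c.toNat = 55 ∨ c.toNat = 56 ∨ c.toNat = 57 := by omega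
  rcases hk with hk|hk|hk|hk|hk|hk|hk|hk|hk|hk <;> (rw [hk] at e; rw [← e]; decide)

theorem qsSeg_refl (cs : List Char) (n : Nat) : qsSeg cs (n + 1) (n + 1) = 0 := by
  simp [qsSeg]

theorem qsSeg_succ (cs : List Char) (a n : Nat) (c : Char) (t : List Char)
    (hd : cs.drop n = c :: t) (ha : a ≤ n) :
    qsSeg cs a (n + 1) = qsSeg cs a n + (if c == '?' then 1 else 0) := by
  have h3 : cs[n]? = some c := by
    have h0 : (cs.drop n)[0]? = some c := by rw [hd]; rfl
    rw [List.getElem?_drop, Nat.add_zero] at h0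
    exact h0
  have h1 : n + 1 - a = (n - a) + 1 := by omega
  have h2 : (cs.drop a)[n - a]? = some c := by
    rw [List.getElem?_drop]
    have : a + (n - a) = n := by omega
    rw [this, h3]
  unfold qsSeg
  rw [h1, List.take_add_one, h2, List.countP_append]
  by_cases hc : c = '?' <;> simp [hc]

theorem qsGapQ_eq (cs : List Char) (p n : Nat) :
    qsGapQ cs (p : Int) (n : Int) = qsSeg cs (p + 1) n := by
  unfold qsGapQ qsSeg
  have h : ((p : Int) + 1) = ((p + 1 : Nat) : Int) := by push_cast; ring
  rw [h, PySem.List.slice_natCast, List.countP_eq_length_filter]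

theorem qsNatCast_bne (k : Nat) : (((k : Nat) : Int) != 3) = (k != 3) := by
  rcases eq_or_ne k 3 with hk | hk
  · subst hk; rfl
  · have h1 : (((k : Nat) : Int) == 3) = false := beq_eq_false_iff_ne.mpr (by exact_mod_cast hk)
    have h2 : ((k : Nat) == 3) = false := beq_eq_false_iff_ne.mpr hk
    simp only [bne, h1, h2]

theorem qs_main (t : List Char) : ∀ (cs : List Char) (n p : Nat) (second : Int) (h : Bool),
    cs.drop n = t → p < n →
    qsLoopA t ((qsSeg cs (p + 1) n : Nat) : Int) second h
      = qsPairs cs ((((p : Int), second) :: qsDigits (n : Int) t).zip (qsDigits (n : Int) t)) h := by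
  induction t with
  | nil => intro cs n p second h hd hp; simp [qsLoopA, qsDigits, qsPairs]
  | cons c t ih =>
    intro cs n p second h hd hp
    have hdrop : cs.drop (n + 1) = t := by
      have h1 : (cs.drop n).drop 1 = t := by rw [hd]; rfl
      rwa [List.drop_drop] at h1
    have hcast' : ((n : Int) + 1) = ((n + 1 : Nat) : Int) := by push_cast; ring
    by_cases hdig : PySem.Chars.isdigit c = true
    · have hcast : ((n : Int) + 1) = ((n + 1 : Nat) : Int) := hcast'
      simp only [qsLoopA, qsDigits, hdig, if_pos, List.zip_cons_cons, qsPairs]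
      rw [Int.add_comm second]
      by_cases hsum : ((PySem.Int.ofChars? [c]).getD 0 + second == 10) = true
      · rw [if_pos hsum, if_pos hsum]
        rw [qsGapQ_eq, qsNatCast_bne]
        by_cases h3 : (qsSeg cs (p + 1) n != 3) = true
        · rw [if_pos h3, if_pos h3]
        · rw [if_neg h3, if_neg h3]
          have := ih cs (n + 1) n ((PySem.Int.ofChars? [c]).getD 0) true hdrop (by omega)
          rw [qsSeg_refl] at this
          simp only [Nat.cast_zero] at this
          rw [hcast]
          exact this
      · rw [if_neg hsum, if_neg hsum]
        have := ih cs (n + 1) n ((PySem.Int.ofChars? [c]).getD 0) h hdrop (by omega)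
        rw [qsSeg_refl] at this
        simp only [Nat.cast_zero] at this
        rw [hcast]
        exact this
    · have hseg := qsSeg_succ cs (p + 1) n c t hd (by omega)
      have hdigf : PySem.Chars.isdigit c = false := by simpa using hdig
      by_cases hq : c = '?'
      · have hqq : (c == '?') = true := by simp [hq]
        simp only [qsLoopA, qsDigits, hdigf, Bool.false_eq_true, if_false, hqq, if_true]
        have := ih cs (n + 1) p second h hdrop (by omega)
        rw [hseg] at this
        simp only [hqq, if_true] at this
        push_cast at this
        rw [hcast']
        exact this
      · have hq' : (c == '?') = false := by simp [hq]
        simp only [qsLoopA, qsDigits, hdigf, Bool.false_eq_true, if_false, hq']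
        have := ih cs (n + 1) p second h hdrop (by omega)
        rw [hseg] at this
        simp only [hq', Bool.false_eq_true, if_false, Nat.add_zero] at this
        rw [hcast']
        exact this

theorem qs_head (t : List Char) : ∀ (cs : List Char) (n : Nat) (qm : Int),
    cs.drop n = t →
    qsLoopA t qm 0 false
      = qsPairs cs ((qsDigits (n : Int) t).zip ((qsDigits (n : Int) t).drop 1)) false := by
  induction t with
  | nil => intro cs n qm hd; simp [qsLoopA, qsDigits, qsPairs]
  | cons c t ih =>
    intro cs n qm hd
    have hdrop : cs.drop (n + 1) = t := by
      have h1 : (cs.drop n).drop 1 = t := by rw [hd]; rfl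
      rwa [List.drop_drop] at h1
    have hcast : ((n : Int) + 1) = ((n + 1 : Nat) : Int) := by push_cast; ring
    by_cases hdig : PySem.Chars.isdigit c = true
    · simp only [qsLoopA, qsDigits, hdig, if_pos, qsVal_ne_ten c hdig, Bool.false_eq_true, if_false,
        List.drop_succ_cons, List.drop_zero]
      have := qs_main t cs (n + 1) n ((PySem.Int.ofChars? [c]).getD 0) false hdrop (by omega)
      rw [qsSeg_refl] at this
      rw [hcast]
      simpa using this
    · by_cases hq : c = '?'
      · have hdigf : PySem.Chars.isdigit c = false := by simpa using hdig
        have hqq : (c == '?') = true := by simp [hq]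
        simp only [qsLoopA, qsDigits, hdigf, Bool.false_eq_true, if_false, hqq, if_true]
        rw [hcast]
        exact ih cs (n + 1) (qm + 1) hdrop
      · have hdigf : PySem.Chars.isdigit c = false := by simpa using hdig
        have hq' : (c == '?') = false := by simp [hq]
        simp only [qsLoopA, qsDigits, hdigf, Bool.false_eq_true, if_false, hq']
        rw [hcast]
        exact ih cs (n + 1) qm hdrop

-- ===== VERDICT (by name: the statement is the Claim_ definition above) =====
theorem QsMarks_spec : Claim_equal_QsMarks := by
  intro s _
  unfold Spec_QsMarks QsMarks QsMarks_alt
  have := qs_head s.toList s.toList 0 0 rfl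
  simp only [Nat.cast_zero] at this
  exact this
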